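-- pv_equiv track=rewrite | github.com/ManiShayestehfar/Masters | equivarient_NN/finite_groups/groups/irrep_mats_generators.py | _is_standard
-- ===== SOURCE A (Python) =====
-- def _is_standard(T):
--     # Rows
--     for row in T:
--         for j in range(len(row) - 1):
--             if not row[j] < row[j + 1]:
--                 return False
--     # Columns
--     max_c = max(len(row) for row in T)
--     for c in range(max_c):
--         col = []
--         for r in range(len(T)):
--             if c < len(T[r]):
--                 col.append(T[r][c])
--         for j in range(len(col) - 1):
--             if not col[j] < col[j + 1]:
--                 return False
--     return True
-- ===== SOURCE B (Python) =====
-- def _is_standard(T):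
--     # Row phase: each row strictly increasing.
--     for row in T:
--         if not all(a < b for a, b in zip(row, row[1:])):
--             return False
--     # Column phase: one row-major pass keeping, per column index, the last
--     # value seen in that column; no column list is ever materialised.
--     last = {}
--     for row in T:
--         for c, v in enumerate(row):
--             if c in last and not last[c] < v:
--                 return False
--             last[c] = v
--     return True
-- ===== Notes on version B (the rewrite author's own statement) =====
-- stated objective: alternative
-- what changed: The column phase no longer materialises each column list under an explicit column loop: B makes one row-major pass keeping a dict from column index to the last value seen in that column, comparing each entry against that running state; the row phase uses zip over adjacent pairs instead of index arithmetic.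
-- outside the precondition, e.g. on _is_standard([]): A raises ValueError, B returns True
import Mathlib
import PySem

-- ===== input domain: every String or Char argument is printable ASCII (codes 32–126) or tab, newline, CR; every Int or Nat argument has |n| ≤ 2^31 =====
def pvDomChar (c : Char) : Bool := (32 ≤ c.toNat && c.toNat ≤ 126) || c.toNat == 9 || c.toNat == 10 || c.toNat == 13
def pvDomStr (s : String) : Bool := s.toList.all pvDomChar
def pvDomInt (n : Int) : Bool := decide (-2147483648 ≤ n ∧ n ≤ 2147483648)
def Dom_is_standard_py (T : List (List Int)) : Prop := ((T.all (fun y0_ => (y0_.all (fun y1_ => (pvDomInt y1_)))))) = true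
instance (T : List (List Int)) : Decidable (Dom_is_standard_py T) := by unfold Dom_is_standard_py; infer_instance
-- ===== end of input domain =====

-- B replaces A's per-column list building with one row-major pass over the entries
-- keeping per-column running state in a dict (objective: alternative decomposition).
-- Pre_ excludes T = [], on which Python A raises ValueError (max() of an empty sequence).


-- ===== PORT A =====
-- 'for j in range(len(row)-1): if not row[j] < row[j+1]: return False' — the
-- adjacent-pair scan with early return, as structural recursion (same comparisons, same order).
def pvPairsA : List Int → Bool
  | a :: b :: t => if a < b then pvPairsA (b :: t) else false
  | _ => true

-- max(len(row) for row in T); max() raises on T = [], excluded by Pre_ (getD 0 is never used inside Pre_).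
def pvMaxC (T : List (List Int)) : Nat := (PySem.List.max? (T.map List.length) (fun x => x)).getD 0

-- 'col = []; for r in range(len(T)): if c < len(T[r]): col.append(T[r][c])'
-- (row.getD c 0 is guarded by c < row.length, exactly Python's in-range T[r][c])
def pvColBuild (c : Nat) (T : List (List Int)) : List Int :=
  T.foldl (fun col row => if c < row.length then col ++ [row.getD c 0] else col) []

def is_standard_py (T : List (List Int)) : Bool :=
  if T.all pvPairsA then
    (List.range (pvMaxC T)).all (fun c => pvPairsA (pvColBuild c T))
  else false

-- ===== PORT B =====
-- 'all(a < b for a, b in zip(row, row[1:]))'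
def pvRowInc (row : List Int) : Bool := (row.zip (row.drop 1)).all (fun p => decide (p.1 < p.2))

-- inner loop 'for c, v in enumerate(row): if c in last and not last[c] < v: return False; last[c] = v'
def pvColStep (last : PySem.Dict Nat Int) (c : Nat) : List Int → Option (PySem.Dict Nat Int)
  | [] => some last
  | v :: vs =>
    match last.get? c with
    | some u => if u < v then pvColStep (last.insert c v) (c + 1) vs else none
    | none => pvColStep (last.insert c v) (c + 1) vs

-- outer loop over the rows threading the dict
def pvColsB (last : PySem.Dict Nat Int) : List (List Int) → Bool
  | [] => true
  | row :: rest =>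
    match pvColStep last 0 row with
    | some l' => pvColsB l' rest
    | none => false

def is_standard_py_alt (T : List (List Int)) : Bool :=
  if T.all pvRowInc then pvColsB PySem.Dict.empty T else false

-- ===== PRECONDITION & SPEC =====
-- Pre_ excludes exactly T = [], where Python A raises ValueError (max() of empty sequence).
def Pre_is_standard_py (T : List (List Int)) : Prop := T ≠ []
instance (T : List (List Int)) : Decidable (Pre_is_standard_py T) := by unfold Pre_is_standard_py; infer_instance
def pvWitness_is_standard_py : List (List Int) := [[1, 2], [2, 3]]

def Spec_is_standard_py (T : List (List Int)) (out : Bool) : Prop := out = is_standard_py_alt T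
instance (T : List (List Int)) (out : Bool) : Decidable (Spec_is_standard_py T out) := by unfold Spec_is_standard_py; infer_instance

-- ===== CLAIM (what is proved, stated in full; the proofs are below) =====
def Claim_equal_is_standard_py : Prop := ∀ (T : List (List Int)), Dom_is_standard_py T → Pre_is_standard_py T → Spec_is_standard_py T (is_standard_py T)

-- ===== LEMMAS AND PROOFS =====

-- the entries of column c, top to bottom (rows shorter than c contribute nothing)
def pvColOf (c : Nat) (T : List (List Int)) : List Int := T.filterMap (fun row => row[c]?)

-- 'the last value seen in column c (if any) is below v'
def pvRel (o : Option Int) (v : Int) : Prop := ∀ u ∈ o, u < v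

theorem pvGetIns (d : PySem.Dict Nat Int) (k : Nat) (v : Int) (k' : Nat) :
    (d.insert k v).get? k' = if k' = k then some v else d.get? k' :=
  PySem.Dict.get?_insert (d := d) (k := k) (v := v) (k' := k')

theorem pvPairsA_iff (row : List Int) : pvPairsA row = true ↔ List.IsChain (· < ·) row := by
  induction row with
  | nil => simp [pvPairsA]
  | cons a t ih =>
    cases t with
    | nil => simp [pvPairsA]
    | cons b t2 =>
      by_cases h : a < b <;> simp [pvPairsA, h, List.isChain_cons_cons, ih]

theorem pvRowInc_iff (row : List Int) : pvRowInc row = true ↔ List.IsChain (· < ·) row := by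
  induction row with
  | nil => simp [pvRowInc]
  | cons a t ih =>
    cases t with
    | nil => simp [pvRowInc]
    | cons b t2 =>
      have hstep : pvRowInc (a :: b :: t2) = (decide (a < b) && pvRowInc (b :: t2)) := by
        simp [pvRowInc]
      rw [hstep, Bool.and_eq_true, decide_eq_true_eq, ih, List.isChain_cons_cons]

theorem pvColBuild_aux (c : Nat) (T : List (List Int)) : ∀ acc : List Int,
    T.foldl (fun col row => if c < row.length then col ++ [row.getD c 0] else col) acc
      = acc ++ pvColOf c T := by
  induction T with
  | nil => intro acc; simp [pvColOf]
  | cons row rest ih =>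
    intro acc
    by_cases h : c < row.length
    · have hv : row.getD c 0 = row[c] := List.getD_eq_getElem row 0 h
      have hg : row[c]? = some row[c] := List.getElem?_eq_getElem h
      simp only [List.foldl_cons, if_pos h]
      rw [ih]
      simp [pvColOf, hg]
    · have hg : row[c]? = none := by
        rw [List.getElem?_eq_none_iff]; omega
      simp only [List.foldl_cons, if_neg h]
      rw [ih]
      simp [pvColOf, hg]

theorem pvColBuild_eq (c : Nat) (T : List (List Int)) : pvColBuild c T = pvColOf c T := by
  simpa using pvColBuild_aux c T []

theorem pvLen_le_maxC (T : List (List Int)) (row : List Int) (h : row ∈ T) :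
    row.length ≤ pvMaxC T := by
  have hm : row.length ∈ T.map List.length := List.mem_map_of_mem h
  cases hx : PySem.List.max? (T.map List.length) (fun x => x) with
  | none =>
    have hT : T.map List.length = [] := (PySem.List.max?_eq_none_iff _ _).mp hx
    rw [hT] at hm
    simp at hm
  | some m =>
    have := PySem.List.max?_isMax hx _ hm
    simpa [pvMaxC, hx] using this

theorem pvColsA_iff (T : List (List Int)) :
    ((List.range (pvMaxC T)).all (fun c => pvPairsA (pvColBuild c T)) = true)
      ↔ ∀ c : Nat, List.IsChain (· < ·) (pvColOf c T) := by
  simp only [List.all_eq_true, List.mem_range, pvColBuild_eq, pvPairsA_iff]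
  constructor
  · intro h c
    by_cases hc : c < pvMaxC T
    · exact h c hc
    · have hnil : pvColOf c T = [] := by
        apply List.filterMap_eq_nil_iff.mpr
        intro row hrow
        have := pvLen_le_maxC T row hrow
        rw [List.getElem?_eq_none_iff]; omega
      rw [hnil]; exact List.isChain_nil
  · intro h c _; exact h c

theorem pvIsChain_opt (o : Option Int) (v : Int) (l : List Int) :
    List.IsChain (· < ·) (o.toList ++ v :: l) ↔ pvRel o v ∧ List.IsChain (· < ·) (v :: l) := by
  cases o <;> simp [pvRel, List.isChain_cons_cons]

theorem pvColStep_some : ∀ (row : List Int) (last : PySem.Dict Nat Int) (c : Nat)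
    (l' : PySem.Dict Nat Int), pvColStep last c row = some l' →
    (∀ i w, row[i]? = some w → pvRel (last.get? (c + i)) w) ∧
    (∀ k, l'.get? k = if c ≤ k ∧ k < c + row.length then row[k - c]? else last.get? k) := by
  intro row
  induction row with
  | nil =>
    intro last c l' h
    simp only [pvColStep, Option.some.injEq] at h
    subst h
    constructor
    · intro i w hw; simp at hw
    · intro k
      have hnot : ¬ (c ≤ k ∧ k < c + ([] : List Int).length) := by
        simp only [List.length_nil, Nat.add_zero]; omega
      rw [if_neg hnot]
  | cons v vs ih =>
    intro last c l' h
    have step : pvColStep (last.insert c v) (c + 1) vs = some l' ∧ pvRel (last.get? c) v := by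
      cases hg : last.get? c with
      | none => exact ⟨by simpa [pvColStep, hg] using h, by simp [pvRel]⟩
      | some u =>
        simp only [pvColStep, hg] at h
        by_cases hu : u < v
        · rw [if_pos hu] at h
          exact ⟨h, by simp [pvRel]; exact hu⟩
        · rw [if_neg hu] at h; exact absurd h (by simp)
    obtain ⟨hstep, hrel⟩ := step
    obtain ⟨ih1, ih2⟩ := ih (last.insert c v) (c + 1) l' hstep
    constructor
    · intro i w hw
      cases i with
      | zero =>
        simp only [List.getElem?_cons_zero, Option.some.injEq] at hw
        subst hw; simpa using hrel
      | succ j =>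
        simp only [List.getElem?_cons_succ] at hw
        have := ih1 j w hw
        rw [pvGetIns] at this
        rw [if_neg (by omega : ¬ (c + 1 + j = c))] at this
        have harith : c + (j + 1) = c + 1 + j := by omega
        rwa [harith]
    · intro k
      by_cases hk : c ≤ k ∧ k < c + (v :: vs).length
      · rw [if_pos hk]
        by_cases hkc : k = c
        · have hnot : ¬ (c + 1 ≤ k ∧ k < c + 1 + vs.length) := by omega
          have h2 := ih2 k
          rw [if_neg hnot] at h2
          rw [h2, pvGetIns, if_pos hkc]
          have hz : k - c = 0 := by omega
          rw [hz]
          simp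
        · have hk2 : c + 1 ≤ k ∧ k < c + 1 + vs.length := by
            simp at hk; omega
          have h2 := ih2 k
          rw [if_pos hk2] at h2
          rw [h2]
          have harith : k - c = (k - (c + 1)) + 1 := by omega
          rw [harith, List.getElem?_cons_succ]
      · rw [if_neg hk]
        have hk2 : ¬ (c + 1 ≤ k ∧ k < c + 1 + vs.length) := by simp at hk ⊢; omega
        have hne : ¬ (k = c) := by simp at hk; omega
        have h2 := ih2 k
        rw [if_neg hk2] at h2
        rw [h2, pvGetIns, if_neg hne]

theorem pvColStep_none : ∀ (row : List Int) (last : PySem.Dict Nat Int) (c : Nat),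
    pvColStep last c row = none →
    ∃ i w, row[i]? = some w ∧ ¬ pvRel (last.get? (c + i)) w := by
  intro row
  induction row with
  | nil => intro last c h; simp [pvColStep] at h
  | cons v vs ih =>
    intro last c h
    cases hg : last.get? c with
    | none =>
      simp only [pvColStep, hg] at h
      obtain ⟨i, w, hw, hrel⟩ := ih (last.insert c v) (c + 1) h
      refine ⟨i + 1, w, by simpa using hw, ?_⟩
      have harith : c + (i + 1) = c + 1 + i := by omega
      rw [harith]
      intro hcon
      apply hrel
      rw [pvGetIns, if_neg (by omega : ¬ (c + 1 + i = c))]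
      exact hcon
    | some u =>
      simp only [pvColStep, hg] at h
      by_cases hu : u < v
      · rw [if_pos hu] at h
        obtain ⟨i, w, hw, hrel⟩ := ih (last.insert c v) (c + 1) h
        refine ⟨i + 1, w, by simpa using hw, ?_⟩
        have harith : c + (i + 1) = c + 1 + i := by omega
        rw [harith]
        intro hcon
        apply hrel
        rw [pvGetIns, if_neg (by omega : ¬ (c + 1 + i = c))]
        exact hcon
      · refine ⟨0, v, by simp, ?_⟩
        simp only [Nat.add_zero, hg]
        intro hcon
        exact hu (hcon u rfl)

theorem pvColsB_iff : ∀ (T : List (List Int)) (last : PySem.Dict Nat Int),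
    pvColsB last T = true ↔
      ∀ c : Nat, List.IsChain (· < ·) ((last.get? c).toList ++ pvColOf c T) := by
  intro T
  induction T with
  | nil =>
    intro last
    simp only [pvColsB, pvColOf, List.filterMap_nil, List.append_nil]
    constructor
    · intro _ c
      cases last.get? c <;> simp
    · intro _; trivial
  | cons row rest ih =>
    intro last
    cases hs : pvColStep last 0 row with
    | none =>
      simp only [pvColsB, hs]
      obtain ⟨i, w, hw, hrel⟩ := pvColStep_none row last 0 hs
      rw [Nat.zero_add] at hrel
      constructor
      · intro h; exact absurd h (by simp)
      · intro h
        have hcol : pvColOf i (row :: rest) = w :: pvColOf i rest := by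
          simp [pvColOf, hw]
        have hi := h i
        rw [hcol, pvIsChain_opt] at hi
        exact absurd hi.1 hrel
    | some l' =>
      simp only [pvColsB, hs]
      obtain ⟨h1, h2⟩ := pvColStep_some row last 0 l' hs
      rw [ih l']
      apply forall_congr'
      intro c
      by_cases hc : c < row.length
      · have hg : row[c]? = some row[c] := List.getElem?_eq_getElem hc
        have hl' : l'.get? c = some row[c] := by
          have h2c := h2 c
          rw [if_pos (by omega : 0 ≤ c ∧ c < 0 + row.length)] at h2c
          rw [h2c, Nat.sub_zero, hg]
        have hcol : pvColOf c (row :: rest) = row[c] :: pvColOf c rest := by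
          simp [pvColOf, hg]
        have hrel := h1 c row[c] hg
        rw [Nat.zero_add] at hrel
        rw [hl', hcol, pvIsChain_opt]
        simp [hrel]
      · have hg : row[c]? = none := by rw [List.getElem?_eq_none_iff]; omega
        have hl' : l'.get? c = last.get? c := by
          have h2c := h2 c
          rw [if_neg (by omega : ¬ (0 ≤ c ∧ c < 0 + row.length))] at h2c
          exact h2c
        have hcol : pvColOf c (row :: rest) = pvColOf c rest := by
          simp [pvColOf, hg]
        rw [hl', hcol]

theorem pvA_iff (T : List (List Int)) :
    is_standard_py T = true ↔
      (∀ row ∈ T, List.IsChain (· < ·) row) ∧ (∀ c : Nat, List.IsChain (· < ·) (pvColOf c T)) := by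
  unfold is_standard_py
  cases hAll : T.all pvPairsA with
  | true =>
    have hrows : ∀ row ∈ T, List.IsChain (· < ·) row := by
      intro row hrow
      exact (pvPairsA_iff row).mp (List.all_eq_true.mp hAll row hrow)
    rw [if_pos rfl, pvColsA_iff]
    constructor
    · intro h; exact ⟨hrows, h⟩
    · rintro ⟨_, h⟩; exact h
  | false =>
    rw [if_neg (by simp)]
    constructor
    · intro h; exact absurd h (by simp)
    · rintro ⟨h1, _⟩
      have : T.all pvPairsA = true :=
        List.all_eq_true.mpr (fun row hrow => (pvPairsA_iff row).mpr (h1 row hrow))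
      rw [hAll] at this; exact absurd this (by simp)

theorem pvB_iff (T : List (List Int)) :
    is_standard_py_alt T = true ↔
      (∀ row ∈ T, List.IsChain (· < ·) row) ∧ (∀ c : Nat, List.IsChain (· < ·) (pvColOf c T)) := by
  unfold is_standard_py_alt
  cases hAll : T.all pvRowInc with
  | true =>
    have hrows : ∀ row ∈ T, List.IsChain (· < ·) row := by
      intro row hrow
      exact (pvRowInc_iff row).mp (List.all_eq_true.mp hAll row hrow)
    have hcols := pvColsB_iff T PySem.Dict.empty
    simp only [PySem.Dict.get?_empty, Option.toList_none, List.nil_append] at hcols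
    rw [if_pos rfl, hcols]
    constructor
    · intro h; exact ⟨hrows, h⟩
    · rintro ⟨_, h⟩; exact h
  | false =>
    rw [if_neg (by simp)]
    constructor
    · intro h; exact absurd h (by simp)
    · rintro ⟨h1, _⟩
      have : T.all pvRowInc = true :=
        List.all_eq_true.mpr (fun row hrow => (pvRowInc_iff row).mpr (h1 row hrow))
      rw [hAll] at this; exact absurd this (by simp)

theorem pvAB_eq (T : List (List Int)) : is_standard_py T = is_standard_py_alt T := by
  have h := (pvA_iff T).trans (pvB_iff T).symm
  cases hA : is_standard_py T <;> cases hB : is_standard_py_alt T <;> simp_all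

-- ===== VERDICT (by name: the statement is the Claim_ definition above) =====
theorem is_standard_py_spec : Claim_equal_is_standard_py := by
  intro T _ _
  show is_standard_py T = is_standard_py_alt T
  exact pvAB_eq T
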